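-- pv_equiv track=rewrite | github.com/IsaacICTS8/Modbus_ICTS | modbus/comunicao_database.py | transforma_dados
-- ===== SOURCE A (Python) =====
-- def transforma_dados(dado_lido) :   #Funcao responsável por transformar os dados pro SCADA
--
--   aux = []
--   scada = []
--   scada_total = {}
--
--   for item in dado_lido :
--     for i in item : #Guarda os dados decimais de forma hexadecimal
--       aux.append(hex(ord(i)))
--
--     tamanho = 0
--
--     while tamanho<len(aux):
--
--       if tamanho != len(aux)-1 :
--           scada.append((aux[tamanho+1][2::])+(aux[tamanho][2::])) #Concatena pares de registros
--       else :
--           scada.append(aux[tamanho][2::])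
--       tamanho+=2
--     scada_total[item] = scada
--     aux = []
--     scada = []
--
--   return scada_total
-- ===== SOURCE B (Python) =====
-- def transforma_dados(dado_lido):
--     scada_total = {}
--     for item in dado_lido:
--         hexes = [hex(ord(c))[2:] for c in item]
--         evens = hexes[0::2]
--         odds = hexes[1::2]
--         pares = [o + e for e, o in zip(evens, odds)]
--         if len(odds) < len(evens):
--             pares.append(evens[-1])
--         scada_total[item] = pares
--     return scada_total
-- ===== Notes on version B (the rewrite author's own statement) =====
-- stated objective: simpler
-- what changed: B replaces A's prebuilt aux list scanned by an indexed while-loop with mutable accumulators by staged passes: a hex list, even/odd stride slices hexes[0::2]/hexes[1::2], a zip of the two halves, and one tail append for odd lengths.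
import Mathlib
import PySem

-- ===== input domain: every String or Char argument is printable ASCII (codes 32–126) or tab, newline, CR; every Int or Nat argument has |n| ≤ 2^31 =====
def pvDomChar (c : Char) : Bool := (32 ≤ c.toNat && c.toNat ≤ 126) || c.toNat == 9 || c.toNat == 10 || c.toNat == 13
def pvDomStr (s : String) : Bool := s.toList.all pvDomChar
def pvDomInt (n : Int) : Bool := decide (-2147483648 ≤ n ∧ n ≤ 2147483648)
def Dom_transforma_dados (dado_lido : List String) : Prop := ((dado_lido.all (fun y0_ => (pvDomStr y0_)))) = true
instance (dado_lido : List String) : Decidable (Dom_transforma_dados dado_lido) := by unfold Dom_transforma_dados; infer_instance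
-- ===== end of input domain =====

-- B replaces A's indexed while-loop with staged passes: hex list, even/odd stride slices, a zip of the two halves, one tail append (objective: simpler).

-- ===== PORT A =====
-- hex(ord(c)) : "0x" ++ lowercase hex digits, no padding; exact for any char (code point ≥ 0; Nat.toDigits 16 gives lowercase digits, no pad)
def pvHexA (c : Char) : String := String.ofList ('0' :: 'x' :: Nat.toDigits 16 c.toNat)

-- s[2::] on a string
def pvSlice2 (s : String) : String := PySem.Str.slice s (some 2) none

-- the 'while tamanho < len(aux)' loop; Python '+' on strings ported as String.ofList (toList ++ toList) (exact)
def pvWhileA (aux : List String) (tamanho : Nat) (scada : List String) : List String :=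
  if tamanho < aux.length then
    pvWhileA aux (tamanho + 2)
      (if tamanho ≠ aux.length - 1 then
        scada ++ [String.ofList ((pvSlice2 (aux.getD (tamanho + 1) "")).toList ++ (pvSlice2 (aux.getD tamanho "")).toList)]
      else
        scada ++ [pvSlice2 (aux.getD tamanho "")])
  else scada
termination_by aux.length - tamanho

def transforma_dados (dado_lido : List String) : List (String × List String) :=
  (dado_lido.foldl
    (fun (scada_total : PySem.Dict String (List String)) item =>
      let aux := item.toList.map pvHexA          -- the inner for-loop appending hex(ord(i))
      let scada := pvWhileA aux 0 []
      scada_total.insert item scada)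
    PySem.Dict.empty).items

-- ===== PORT B =====
-- hex(ord(c))[2:] : the "0x" prefix stripped by the slice
def pvHexB (c : Char) : String :=
  PySem.Str.slice (String.ofList ('0' :: 'x' :: Nat.toDigits 16 c.toNat)) (some 2) none

-- xs[0::2] (every second element starting at index 0); hand port of the step-2 slice, exact:
-- keeps element 0, drops element 1, recurses on the rest, as the stride slice does
def pvStride2 {α : Type} : List α → List α
  | [] => []
  | [a] => [a]
  | a :: _ :: rest => a :: pvStride2 rest

def transforma_dados_alt (dado_lido : List String) : List (String × List String) :=
  (dado_lido.foldl
    (fun (d : PySem.Dict String (List String)) item =>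
      let hexes := item.toList.map pvHexB
      let evens := pvStride2 hexes          -- hexes[0::2]
      let odds  := pvStride2 hexes.tail     -- hexes[1::2] = (tail)[0::2], exact
      let pares := (evens.zip odds).map (fun p => String.ofList (p.2.toList ++ p.1.toList))  -- o + e
      let pares := if odds.length < evens.length then
          pares ++ [PySem.List.pyGetD evens (-1) ""]   -- evens[-1]; evens ≠ [] under the guard, pyGetD exact
        else pares
      d.insert item pares)
    PySem.Dict.empty).items

-- ===== PRECONDITION & SPEC =====
def Spec_transforma_dados (dado_lido : List String) (out : List (String × List String)) : Prop := out = transforma_dados_alt dado_lido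
instance (dado_lido : List String) (out : List (String × List String)) : Decidable (Spec_transforma_dados dado_lido out) := by unfold Spec_transforma_dados; infer_instance

-- ===== CLAIM (what is proved, stated in full; the proofs are below) =====
def Claim_equal_transforma_dados : Prop := ∀ (dado_lido : List String), Dom_transforma_dados dado_lido → Spec_transforma_dados dado_lido (transforma_dados dado_lido)

-- ===== LEMMAS AND PROOFS =====

-- proof-side helper: A's pairing written as a structural recursion (odd tail inline)
def pvPairsB (s : List Char) : List String :=
  match s with
  | a :: b :: rest => String.ofList (Nat.toDigits 16 b.toNat ++ Nat.toDigits 16 a.toNat) :: pvPairsB rest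
  | [a] => [String.ofList (Nat.toDigits 16 a.toNat)]
  | [] => []

-- s[2:] of hex(ord(c)) is the bare digits
lemma slice2_hexA (c : Char) : (pvSlice2 (pvHexA c)).toList = Nat.toDigits 16 c.toNat := by
  simp [pvSlice2, pvHexA, PySem.Str.toList_slice, PySem.List.slice_from]

lemma hexB_eq (c : Char) : pvHexB c = String.ofList (Nat.toDigits 16 c.toNat) := by
  have h : (pvHexB c).toList = Nat.toDigits 16 c.toNat := slice2_hexA c
  rw [← String.ofList_toList (s := pvHexB c), h]

lemma whileA_spec_aux : ∀ (n : Nat) (cs : List Char) (t : Nat) (scada : List String),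
    cs.length - t ≤ n →
    pvWhileA (cs.map pvHexA) t scada = scada ++ pvPairsB (cs.drop t) := by
  intro n
  induction n with
  | zero =>
    intro cs t scada h
    have hge : ¬ t < cs.length := by omega
    rw [pvWhileA]
    simp [List.length_map, hge, List.drop_of_length_le (by omega : cs.length ≤ t), pvPairsB]
  | succ n ih =>
    intro cs t scada h
    rw [pvWhileA]
    simp only [List.length_map]
    by_cases hlt : t < cs.length
    · rw [if_pos hlt]
      by_cases hne : t ≠ cs.length - 1
      · have h1 : t + 1 < cs.length := by omega
        rw [if_pos hne]
        rw [ih cs (t + 2) _ (by omega)]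
        have g1 : (cs.map pvHexA).getD (t + 1) "" = pvHexA cs[t + 1] := by
          rw [List.getD_eq_getElem _ _ (by simpa using h1), List.getElem_map]
        have g0 : (cs.map pvHexA).getD t "" = pvHexA cs[t] := by
          rw [List.getD_eq_getElem _ _ (by simpa using hlt), List.getElem_map]
        rw [g1, g0, slice2_hexA, slice2_hexA]
        rw [List.drop_eq_getElem_cons hlt, List.drop_eq_getElem_cons h1]
        simp [pvPairsB]
      · have ht : t = cs.length - 1 := by omega
        rw [if_neg hne]
        rw [ih cs (t + 2) _ (by omega)]
        have g0 : (cs.map pvHexA).getD t "" = pvHexA cs[t] := by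
          rw [List.getD_eq_getElem _ _ (by simpa using hlt), List.getElem_map]
        rw [g0]
        have hd : (pvSlice2 (pvHexA cs[t])) = String.ofList (Nat.toDigits 16 (cs[t]).toNat) := by
          have h2 := slice2_hexA cs[t]
          rw [← String.ofList_toList (s := pvSlice2 (pvHexA cs[t])), h2]
        rw [List.drop_eq_getElem_cons hlt,
            List.drop_of_length_le (by omega : cs.length ≤ t + 1),
            List.drop_of_length_le (by omega : cs.length ≤ t + 2)]
        simp [pvPairsB, hd]
    · rw [if_neg hlt]
      simp [List.drop_of_length_le (by omega : cs.length ≤ t), pvPairsB]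

-- the while loop computes pvPairsB of the characters
lemma whileA_spec (cs : List Char) (scada : List String) :
    pvWhileA (cs.map pvHexA) 0 scada = scada ++ pvPairsB cs := by
  simpa using whileA_spec_aux cs.length cs 0 scada (by omega)

lemma stride2_cons_tail {α : Type} (b : α) (rest : List α) :
    pvStride2 (b :: rest) = b :: pvStride2 rest.tail := by
  cases rest <;> simp [pvStride2]

-- A's pairing equals B's even/odd-slice-and-zip pipeline
lemma pairsB_eq (cs : List Char) :
    pvPairsB cs =
      (let hexes := cs.map pvHexB
       let evens := pvStride2 hexes
       let odds := pvStride2 hexes.tail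
       let pares := (evens.zip odds).map (fun p => String.ofList (p.2.toList ++ p.1.toList))
       if odds.length < evens.length then pares ++ [PySem.List.pyGetD evens (-1) ""] else pares) := by
  simp only
  fun_induction pvPairsB cs with
  | case1 a b rest ih =>
    simp only [List.map_cons, stride2_cons_tail, List.tail_cons, List.zip_cons_cons,
      List.map_cons, hexB_eq, String.toList_ofList, List.length_cons, Nat.add_lt_add_iff_right]
    by_cases hc : (pvStride2 (rest.map pvHexB).tail).length < (pvStride2 (rest.map pvHexB)).length
    · rw [if_pos hc]; rw [if_pos hc] at ih
      have hne : pvStride2 (rest.map pvHexB) ≠ [] := by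
        intro h0; rw [h0] at hc; simp at hc
      have hget : PySem.List.pyGetD
          (String.ofList (Nat.toDigits 16 a.toNat) :: pvStride2 (rest.map pvHexB)) (-1) "" =
          PySem.List.pyGetD (pvStride2 (rest.map pvHexB)) (-1) "" := by
        rw [PySem.List.pyGetD_neg_one (h := by simp), PySem.List.pyGetD_neg_one (h := hne)]
        exact List.getLast_cons hne
      rw [hget, ih]; simp
    · rw [if_neg hc]; rw [if_neg hc] at ih; rw [ih]
  | case2 a =>
    simp [pvStride2, hexB_eq,
      PySem.List.pyGetD_neg_one (xs := [String.ofList (Nat.toDigits 16 a.toNat)]) (h := by simp)]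
  | case3 => simp [pvStride2]

-- ===== VERDICT (by name: the statement is the Claim_ definition above) =====
theorem transforma_dados_spec : Claim_equal_transforma_dados := by
  intro dado_lido _
  unfold Spec_transforma_dados transforma_dados transforma_dados_alt
  have h : ∀ (item : String),
      pvWhileA (item.toList.map pvHexA) 0 [] =
        (let hexes := item.toList.map pvHexB
         let evens := pvStride2 hexes
         let odds := pvStride2 hexes.tail
         let pares := (evens.zip odds).map (fun p => String.ofList (p.2.toList ++ p.1.toList))
         if odds.length < evens.length then pares ++ [PySem.List.pyGetD evens (-1) ""] else pares) := by
    intro item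
    rw [whileA_spec item.toList [], pairsB_eq]
    simp
  simp only [h]
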